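-- pv_equiv track=rewrite | github.com/bclark27/SylSpeak | main.py | split_cv
-- ===== SOURCE A (Python) =====
-- vowels = "aeiou"
--
-- def split_cv(word):
--
--   groups = []
--   current = ""
--   current_type = None
--
--   for ch in word.lower():
--     if ch.isalpha():
--       if ch in vowels:
--         ch_type = "V"
--       else:
--         ch_type = "C"
--
--       if current_type == ch_type or current_type is None:
--         current += ch
--       else:
--         groups.append(current)
--         current = ch
--       current_type = ch_type
--   if current:
--     groups.append(current)
--   return groups
-- ===== SOURCE B (Python) =====
-- vowels = "aeiou"
--
-- def split_cv(word):
--   # filter the letters first, then cut the list into maximal same-type runs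
--   letters = [c for c in word.lower() if c.isalpha()]
--   groups = []
--   n = len(letters)
--   i = 0
--   while i < n:
--     v = letters[i] in vowels
--     j = i + 1
--     while j < n and (letters[j] in vowels) == v:
--       j += 1
--     groups.append("".join(letters[i:j]))
--     i = j
--   return groups
-- ===== Notes on version B (the rewrite author's own statement) =====
-- stated objective: alternative
-- what changed: Replaces A's one-pass current/current_type state machine (with skip-in-place of non-letters) by a filter pass that keeps only letters followed by a run-cutting scan that emits each maximal same-type run directly.
import Mathlib
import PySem

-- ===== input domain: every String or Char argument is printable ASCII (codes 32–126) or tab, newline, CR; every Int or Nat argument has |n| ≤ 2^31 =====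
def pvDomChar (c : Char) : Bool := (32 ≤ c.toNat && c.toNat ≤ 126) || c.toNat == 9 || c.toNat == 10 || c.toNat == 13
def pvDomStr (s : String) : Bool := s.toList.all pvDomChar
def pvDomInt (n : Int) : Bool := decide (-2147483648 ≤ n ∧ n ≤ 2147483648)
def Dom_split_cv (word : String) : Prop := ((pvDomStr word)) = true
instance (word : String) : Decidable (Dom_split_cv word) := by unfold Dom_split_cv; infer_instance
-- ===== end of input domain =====

-- B replaces A's character state machine by a letters-only filter pass plus a run-cutting scan; alternative decomposition, same cost.

-- shared constant/test: Python's `ch in vowels` with vowels = "aeiou"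
def pvIsVowel (c : Char) : Bool := PySem.Chars.isIn [c] "aeiou".toList

-- ===== PORT A =====
-- loop body of A: state = (groups, current, current_type); non-letters leave the state unchanged
def pvStepA (st : List (List Char) × List Char × Option Bool) (ch : Char) :
    List (List Char) × List Char × Option Bool :=
  if PySem.Chars.isalpha ch then
    let chType := pvIsVowel ch
    if st.2.2 = some chType ∨ st.2.2 = none then (st.1, st.2.1 ++ [ch], some chType)
    else (st.1 ++ [st.2.1], [ch], some chType)
  else st

-- A's trailing `if current: groups.append(current)`
def pvFinish (st : List (List Char) × List Char × Option Bool) : List (List Char) :=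
  if st.2.1.isEmpty then st.1 else st.1 ++ [st.2.1]

def split_cv (word : String) : List String :=
  (pvFinish ((PySem.Chars.lower word.toList).foldl pvStepA ([], [], none))).map
    (fun g => String.ofList g)

-- ===== PORT B =====
-- B's outer while over the suffix letters[i:]: the inner index scan j collects the
-- maximal same-type run (takeWhile of the tail) and i jumps past it (dropWhile)
def pvChunks : List Char → List (List Char)
  | [] => []
  | c :: cs =>
      (c :: cs.takeWhile (fun d => pvIsVowel d == pvIsVowel c)) ::
        pvChunks (cs.dropWhile (fun d => pvIsVowel d == pvIsVowel c))
  termination_by l => l.length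
  decreasing_by
    exact Nat.lt_succ_of_le (List.length_dropWhile_le _ _)

def split_cv_alt (word : String) : List String :=
  ((pvChunks ((PySem.Chars.lower word.toList).filter PySem.Chars.isalpha)).map
    (fun g => String.ofList g))

-- ===== PRECONDITION & SPEC =====
def Spec_split_cv (word : String) (out : List String) : Prop := out = split_cv_alt word
instance (word : String) (out : List String) : Decidable (Spec_split_cv word out) := by unfold Spec_split_cv; infer_instance

-- ===== CLAIM (what is proved, stated in full; the proofs are below) =====
def Claim_equal_split_cv : Prop := ∀ (word : String), Dom_split_cv word → Spec_split_cv word (split_cv word)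

-- ===== LEMMAS AND PROOFS =====

-- how a pending run `cur` of type `t` merges with the chunks of the rest
def pvMerge (cur : List Char) (t : Bool) : List (List Char) → List (List Char)
  | [] => [cur]
  | [] :: rest => cur :: [] :: rest
  | (d :: h) :: rest => if pvIsVowel d == t then (cur ++ d :: h) :: rest else cur :: (d :: h) :: rest

-- A's fold skips non-letters, so it only sees the filtered list
theorem foldl_stepA_filter (l : List Char) (st : List (List Char) × List Char × Option Bool) :
    l.foldl pvStepA st = (l.filter PySem.Chars.isalpha).foldl pvStepA st := by
  induction l generalizing st with
  | nil => rfl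
  | cons c cs ih =>
      by_cases h : PySem.Chars.isalpha c
      · simp [h, ih]
      · simp [h, List.foldl_cons, pvStepA, ih]

theorem merge_head (cs : List Char) (cur : List Char) (c : Char) :
    pvMerge (cur ++ [c]) (pvIsVowel c) (pvChunks cs)
      = (cur ++ c :: cs.takeWhile (fun d => pvIsVowel d == pvIsVowel c)) ::
          pvChunks (cs.dropWhile (fun d => pvIsVowel d == pvIsVowel c)) := by
  cases cs with
  | nil => simp [pvChunks, pvMerge]
  | cons d ds =>
      rw [pvChunks]
      by_cases hv : pvIsVowel d = pvIsVowel c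
      · simp [pvMerge, hv]
      · have hv' : (pvIsVowel d == pvIsVowel c) = false := by simp [hv]
        simp [pvMerge, hv', pvChunks]

theorem main_invariant (l : List Char) (hall : ∀ c ∈ l, PySem.Chars.isalpha c = true)
    (g : List (List Char)) (cur : List Char) (t : Bool) (hcur : cur ≠ []) :
    pvFinish (l.foldl pvStepA (g, cur, some t)) = g ++ pvMerge cur t (pvChunks l) := by
  induction l generalizing g cur t with
  | nil => simp [pvFinish, pvMerge, hcur, pvChunks]
  | cons c cs ih =>
      have ha : PySem.Chars.isalpha c = true := hall c List.mem_cons_self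
      have hall' : ∀ d ∈ cs, PySem.Chars.isalpha d = true :=
        fun d hd => hall d (List.mem_cons_of_mem _ hd)
      by_cases ht : t = pvIsVowel c
      · have : pvStepA (g, cur, some t) c = (g, cur ++ [c], some (pvIsVowel c)) := by
          simp [pvStepA, ha, ht]
        rw [List.foldl_cons, this, ih hall' _ _ _ (by simp),
            merge_head, pvChunks, ht, pvMerge]
        simp
      · have : pvStepA (g, cur, some t) c = (g ++ [cur], [c], some (pvIsVowel c)) := by
          simp [pvStepA, ha, ht]
        rw [List.foldl_cons, this, ih hall' _ _ _ (by simp)]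
        have h0 := merge_head cs [] c
        simp only [List.nil_append] at h0
        rw [h0, pvChunks, pvMerge]
        have hne : pvIsVowel c ≠ t := Ne.symm ht
        simp [hne]

-- ===== VERDICT (by name: the statement is the Claim_ definition above) =====
theorem split_cv_spec : Claim_equal_split_cv := by
  intro word _
  unfold Spec_split_cv split_cv split_cv_alt
  rw [foldl_stepA_filter]
  cases hfl : (PySem.Chars.lower word.toList).filter PySem.Chars.isalpha with
  | nil => simp [pvFinish, pvChunks]
  | cons c cs =>
      have ha : PySem.Chars.isalpha c := by
        have : c ∈ (PySem.Chars.lower word.toList).filter PySem.Chars.isalpha := by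
          rw [hfl]; exact List.mem_cons_self
        exact (List.mem_filter.mp this).2
      have hstep : pvStepA ([], [], none) c = ([], [c], some (pvIsVowel c)) := by
        simp [pvStepA, ha]
      have hall : ∀ d ∈ cs, PySem.Chars.isalpha d = true := by
        intro d hd
        have : d ∈ (PySem.Chars.lower word.toList).filter PySem.Chars.isalpha := by
          rw [hfl]; exact List.mem_cons_of_mem _ hd
        exact (List.mem_filter.mp this).2
      rw [List.foldl_cons, hstep, main_invariant _ hall _ _ _ (by simp)]
      have h0 := merge_head cs [] c
      simp only [List.nil_append] at h0
      rw [h0, pvChunks]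
      simp
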